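-- pv_equiv track=rewrite | github.com/Kuborgc6/Advent2020 | day9.py | find_invalid
-- ===== SOURCE A (Python) =====
-- def find_invalid(rand_list, preamble):
--     for i in range(preamble,preamble+len(rand_list[preamble:])):
--         sum_list = list()
--         for j in range(i-preamble,i):
--             for k in range(j,i):
--                 sum_list.append(rand_list[j]+rand_list[k])
--         if rand_list[i] not in sum_list:
--             for j in range(i):
--                 temp_result = rand_list[j]
--                 list_result = list()
--                 list_result.append(rand_list[j])
--                 while(temp_result < rand_list[i]):
--                     j += 1
--                     temp_result += rand_list[j]
--                     list_result.append(rand_list[j])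
--                 if rand_list[i] == temp_result:
--                     result = min(list_result) + max(list_result)
--                     return result
-- ===== SOURCE B (Python) =====
-- def find_invalid(rand_list, preamble):
--     n = len(rand_list)
--     # prefix sums: pref[k] = sum of rand_list[:k]
--     pref = [0]
--     total = 0
--     for x in rand_list:
--         total += x
--         pref.append(total)
--     for i in range(preamble, n):
--         t = rand_list[i]
--         window = set(rand_list[i - preamble:i])
--         if not any(t - x in window for x in window):
--             for j in range(i):
--                 k = j
--                 while k < n and pref[k + 1] - pref[j] < t:
--                     k += 1
--                 if k < n and pref[k + 1] - pref[j] == t: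
--                     seg = rand_list[j:k + 1]
--                     return min(seg) + max(seg)
--     return None
-- ===== Notes on version B (the rewrite author's own statement) =====
-- stated objective: faster
-- what changed: The validity test uses a set-based two-sum membership check over the preamble window instead of materialising all O(p^2) pairwise sums into a list and scanning it, and the contiguous-run search walks a precomputed prefix-sum array instead of re-accumulating each candidate run element by element into a list.
-- outside the precondition, e.g. on find_invalid([1, 2, 3], -1): A returns None, B returns 3
import Mathlib
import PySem

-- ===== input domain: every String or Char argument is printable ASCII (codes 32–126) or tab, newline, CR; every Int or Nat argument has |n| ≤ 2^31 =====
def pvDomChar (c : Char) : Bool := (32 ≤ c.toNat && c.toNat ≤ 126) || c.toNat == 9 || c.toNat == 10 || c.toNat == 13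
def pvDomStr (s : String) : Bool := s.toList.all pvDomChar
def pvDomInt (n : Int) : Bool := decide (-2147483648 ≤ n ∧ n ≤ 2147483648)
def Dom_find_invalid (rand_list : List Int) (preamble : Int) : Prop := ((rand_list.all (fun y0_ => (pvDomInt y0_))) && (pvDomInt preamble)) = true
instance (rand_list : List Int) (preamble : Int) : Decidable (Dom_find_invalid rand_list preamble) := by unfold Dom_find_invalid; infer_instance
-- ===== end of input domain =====

-- B replaces A's quadratic pairwise-sum list with a set-based two-sum check and A's per-run
-- re-accumulation with a precomputed prefix-sum array (objective: faster).


-- ===== PORT A =====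
-- sum_list built by the two nested loops 'for j in range(i-preamble,i): for k in range(j,i): append'
def pvA_sumlist (L : List Int) (p i : Int) : List Int :=
  (PySem.List.pyRange (i - p) i 1).foldl (fun acc j =>
    (PySem.List.pyRange j i 1).foldl (fun acc2 k =>
      acc2 ++ [PySem.List.pyGetD L j 0 + PySem.List.pyGetD L k 0]) acc) []

-- the 'while temp_result < rand_list[i]' loop; none = IndexError at rand_list[j] (outside Pre_)
def pvA_while (L : List Int) (t : Int) : Nat → Int → Int → List Int → Option (Int × List Int)
  | 0, _, _, _ => none
  | f + 1, cur, temp, lst =>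
    if temp < t then
      match PySem.List.pyGet? L (cur + 1) with
      | none => none          -- Python raises IndexError here; modelled as continue in pvA_searchJ
      | some v => pvA_while L t f (cur + 1) (temp + v) (lst ++ [v])
    else some (temp, lst)

-- 'for j in range(i):' body of the contiguous-run search
def pvA_searchJ (L : List Int) (t : Int) : List Int → Option Int
  | [] => none
  | j :: rest =>
    let a := PySem.List.pyGetD L j 0
    match pvA_while L t (L.length + 1) j a [a] with
    | none => pvA_searchJ L t rest
    | some (temp, lst) =>
      if t = temp then
        some ((PySem.List.min? lst (fun x => x)).getD 0 + (PySem.List.max? lst (fun x => x)).getD 0)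
      else pvA_searchJ L t rest

-- 'for i in range(preamble, preamble+len(rand_list[preamble:])):'
def pvA_go (L : List Int) (p : Int) : List Int → Option Int
  | [] => none
  | i :: rest =>
    let sum_list := pvA_sumlist L p i
    if PySem.List.pyGetD L i 0 ∈ sum_list then pvA_go L p rest
    else
      match pvA_searchJ L (PySem.List.pyGetD L i 0) (PySem.List.pyRange 0 i 1) with
      | some r => some r
      | none => pvA_go L p rest

def find_invalid (rand_list : List Int) (preamble : Int) : Option Int :=
  pvA_go rand_list preamble
    (PySem.List.pyRange preamble
      (preamble + ((PySem.List.slice rand_list (some preamble) none).length : Int)) 1)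

-- ===== PORT B =====
-- 'pref = [0]; total = 0; for x in rand_list: total += x; pref.append(total)'
def pvB_pref (L : List Int) : List Int :=
  (L.foldl (fun st x => (st.1 + x, st.2 ++ [st.1 + x])) ((0 : Int), ([(0 : Int)]))).2

-- 'while k < n and pref[k+1] - pref[j] < t: k += 1'
def pvB_while (pref : List Int) (n : Nat) (t j : Int) : Nat → Int → Int
  | 0, k => k
  | f + 1, k =>
    if k < (n : Int) ∧ PySem.List.pyGetD pref (k + 1) 0 - PySem.List.pyGetD pref j 0 < t then
      pvB_while pref n t j f (k + 1)
    else k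

-- 'for j in range(i):' of Source B
def pvB_searchJ (L pref : List Int) (n : Nat) (t : Int) : List Int → Option Int
  | [] => none
  | j :: rest =>
    let k := pvB_while pref n t j (n + 1) j
    if k < (n : Int) ∧ PySem.List.pyGetD pref (k + 1) 0 - PySem.List.pyGetD pref j 0 = t then
      let seg := PySem.List.slice L (some j) (some (k + 1))
      some ((PySem.List.min? seg (fun x => x)).getD 0 + (PySem.List.max? seg (fun x => x)).getD 0)
    else pvB_searchJ L pref n t rest

-- 'for i in range(preamble, n):' of Source B
def pvB_go (L pref : List Int) (n : Nat) (p : Int) : List Int → Option Int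
  | [] => none
  | i :: rest =>
    let t := PySem.List.pyGetD L i 0
    let window : PySem.Set Int := PySem.Set.ofList (PySem.List.slice L (some (i - p)) (some i))
    if window.any (fun x => decide ((t - x) ∈ window)) then pvB_go L pref n p rest
    else
      match pvB_searchJ L pref n t (PySem.List.pyRange 0 i 1) with
      | some r => some r
      | none => pvB_go L pref n p rest

def find_invalid_alt (rand_list : List Int) (preamble : Int) : Option Int :=
  pvB_go rand_list (pvB_pref rand_list) rand_list.length preamble
    (PySem.List.pyRange preamble (rand_list.length : Int) 1)

-- ===== PRECONDITION & SPEC =====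
-- sum of the segment rand_list[j..k] (inclusive)
abbrev pvSeg (L : List Int) (j k : Nat) : Int := ((L.drop j).take (k + 1 - j)).sum
-- position i fails the preamble pairwise-sum test (pairs with repetition, as A checks them)
abbrev pvInvalidAt (L : List Int) (p i : Nat) : Prop :=
  ¬ ∃ j ∈ Finset.Ico (i - p) i, ∃ k ∈ Finset.Ico j i, L.getD j 0 + L.getD k 0 = L.getD i 0
-- the run started at j never reaches the target: A's while walks off the end (IndexError)
abbrev pvCrashesJ (L : List Int) (t : Int) (j : Nat) : Prop :=
  ∀ k ∈ Finset.Ico j L.length, pvSeg L j k < t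
-- the run started at j stops exactly on the target: A returns from this j
abbrev pvReturnsJ (L : List Int) (t : Int) (j : Nat) : Prop :=
  ∃ k ∈ Finset.Ico j L.length, pvSeg L j k = t ∧ ∀ k' ∈ Finset.Ico j k, pvSeg L j k' < t
abbrev pvCrashAt (L : List Int) (p i : Nat) : Prop :=
  pvInvalidAt L p i ∧ ∃ j ∈ Finset.range i,
    pvCrashesJ L (L.getD i 0) j ∧ ∀ j' ∈ Finset.range j, ¬ pvReturnsJ L (L.getD i 0) j'
abbrev pvReturnAt (L : List Int) (p i : Nat) : Prop :=
  pvInvalidAt L p i ∧ ∃ j ∈ Finset.range i,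
    pvReturnsJ L (L.getD i 0) j ∧ ∀ j' ∈ Finset.range j, ¬ pvCrashesJ L (L.getD i 0) j'
-- A's execution reaches a position whose run search walks off the end of the list
abbrev pvCrash (L : List Int) (p : Nat) : Prop :=
  ∃ i ∈ Finset.Ico p L.length, pvCrashAt L p i ∧ ∀ i' ∈ Finset.Ico p i, ¬ pvReturnAt L p i'

-- Pre_ excludes negative preamble (outside the puzzle's natural domain: A then iterates with
-- negative indices and returns None without examining any window, or raises IndexError), and
-- inputs where A's contiguous-run scan walks past the end of the list and raises IndexError.
def Pre_find_invalid (rand_list : List Int) (preamble : Int) : Prop :=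
  0 ≤ preamble ∧ ¬ pvCrash rand_list preamble.toNat
instance (rand_list : List Int) (preamble : Int) : Decidable (Pre_find_invalid rand_list preamble) := by
  unfold Pre_find_invalid; infer_instance

def pvWitness_find_invalid : List Int × Int := ([1, 2, 3, 5, 8], 2)

def Spec_find_invalid (rand_list : List Int) (preamble : Int) (out : Option Int) : Prop := out = find_invalid_alt rand_list preamble
instance (rand_list : List Int) (preamble : Int) (out : Option Int) : Decidable (Spec_find_invalid rand_list preamble out) := by unfold Spec_find_invalid; infer_instance

-- ===== CLAIM (what is proved, stated in full; the proofs are below) =====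
def Claim_equal_find_invalid : Prop := ∀ (rand_list : List Int) (preamble : Int), Dom_find_invalid rand_list preamble → Pre_find_invalid rand_list preamble → Spec_find_invalid rand_list preamble (find_invalid rand_list preamble)

-- ===== LEMMAS AND PROOFS =====

lemma pv_range_eq (L : List Int) (p : Int) (hp : 0 ≤ p) :
    PySem.List.pyRange p (p + ((PySem.List.slice L (some p) none).length : Int)) 1
      = PySem.List.pyRange p (L.length : Int) 1 := by
  rw [PySem.List.slice_from L hp, List.length_drop]
  by_cases h : p ≤ (L.length : Int)
  · congr 1; omega
  · rw [PySem.List.pyRange_one_eq_nil (by omega), PySem.List.pyRange_one_eq_nil (by omega)]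

lemma pv_pref_fold (L : List Int) : ∀ (t0 : Int) (pr : List Int),
    L.foldl (fun st x => (st.1 + x, st.2 ++ [st.1 + x])) (t0, pr)
      = (t0 + L.sum, pr ++ (List.range L.length).map (fun k => t0 + (L.take (k + 1)).sum)) := by
  induction L with
  | nil => intro t0 pr; simp
  | cons a L ih =>
    intro t0 pr
    simp only [List.foldl_cons, ih]
    simp only [Prod.mk.injEq]
    refine ⟨by simp; ring, ?_⟩
    rw [List.length_cons, List.range_succ_eq_map]
    simp [List.append_assoc, Function.comp_def]
    intro k _; ring

lemma pv_pref_eq (L : List Int) :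
    pvB_pref L = (List.range (L.length + 1)).map (fun k => (L.take k).sum) := by
  unfold pvB_pref
  rw [pv_pref_fold]
  rw [List.range_succ_eq_map]
  simp [Function.comp_def]

lemma pv_pref_get (L : List Int) (k : Nat) (hk : k ≤ L.length) :
    PySem.List.pyGetD (pvB_pref L) (k : Int) 0 = (L.take k).sum := by
  rw [PySem.List.pyGetD_natCast, pv_pref_eq]
  rw [List.getD_eq_getElem?_getD, List.getElem?_map, List.getElem?_range (by omega)]
  simp

lemma pv_seg_eq (L : List Int) (j k : Nat) (hj : j ≤ k + 1) :
    (L.take (k + 1)).sum - (L.take j).sum = pvSeg L j k := by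
  have h : k + 1 = j + (k + 1 - j) := by omega
  conv_lhs => rw [h, List.take_add, List.sum_append]
  ring

lemma pv_sum_diff (L : List Int) (j : Int) (hj : 0 ≤ j) (c : Nat)
    (hjc : j.toNat ≤ c) (hc : c < L.length) :
    PySem.List.pyGetD (pvB_pref L) ((c : Int) + 1) 0 - PySem.List.pyGetD (pvB_pref L) j 0
      = pvSeg L j.toNat c := by
  have h1 : ((c : Int) + 1) = (((c + 1 : Nat)) : Int) := by push_cast; ring
  have h2 : j = ((j.toNat : Nat) : Int) := by omega
  rw [h1, h2, pv_pref_get L (c+1) (by omega), pv_pref_get L j.toNat (by omega),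
    pv_seg_eq L j.toNat c (by omega)]
  norm_num
  rw [show max j 0 = j from by omega]

lemma pv_seg_succ (L : List Int) (j c : Nat) (hj : j ≤ c + 1) (hc : c + 1 < L.length) :
    pvSeg L j c + L[c + 1] = pvSeg L j (c + 1) := by
  rw [← pv_seg_eq L j c (by omega), ← pv_seg_eq L j (c+1) (by omega)]
  rw [List.sum_take_succ _ _ hc]
  ring

lemma pv_slice_snoc (L : List Int) (j : Int) (hj : 0 ≤ j) (c : Nat)
    (hjc : j.toNat ≤ c + 1) (hc : c + 1 < L.length) :
    PySem.List.slice L (some j) (some ((c : Int) + 1)) ++ [L[c + 1]]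
      = PySem.List.slice L (some j) (some (((c + 1 : Nat) : Int) + 1)) := by
  rw [PySem.List.slice_toNat L hj (by positivity), PySem.List.slice_toNat L hj (by positivity)]
  have e1 : ((c : Int) + 1).toNat = c + 1 := by omega
  have e2 : ((((c + 1 : Nat)) : Int) + 1).toNat = c + 2 := by omega
  rw [e1, e2]
  have e3 : c + 2 - j.toNat = (c + 1 - j.toNat) + 1 := by omega
  rw [e3, List.take_add_one]
  have hlt : c + 1 - j.toNat < (L.drop j.toNat).length := by
    rw [List.length_drop]; omega
  rw [List.getElem?_eq_getElem hlt]
  congr 1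
  simp [List.getElem_drop]
  congr 1
  omega

lemma pv_while_eq (L : List Int) (t j : Int) (hj : 0 ≤ j) :
    ∀ (f : Nat) (cur : Nat), j.toNat ≤ cur → cur < L.length → L.length - cur < f →
    ((∃ k : Nat, cur ≤ k ∧ k < L.length ∧
        pvB_while (pvB_pref L) L.length t j f (cur : Int) = (k : Int) ∧
        pvA_while L t f (cur : Int) (pvSeg L j.toNat cur)
            (PySem.List.slice L (some j) (some ((cur : Int) + 1)))
          = some (pvSeg L j.toNat k, PySem.List.slice L (some j) (some ((k : Int) + 1))))
     ∨ (pvB_while (pvB_pref L) L.length t j f (cur : Int) = (L.length : Int) ∧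
        pvA_while L t f (cur : Int) (pvSeg L j.toNat cur)
            (PySem.List.slice L (some j) (some ((cur : Int) + 1))) = none)) := by
  intro f
  induction f with
  | zero => intro cur h1 h2 h3; omega
  | succ f ih =>
    intro cur h1 h2 h3
    have hsum := pv_sum_diff L j hj cur h1 h2
    by_cases hlt : pvSeg L j.toNat cur < t
    · -- loop continues
      have hBstep : pvB_while (pvB_pref L) L.length t j (f+1) (cur : Int)
          = pvB_while (pvB_pref L) L.length t j f ((cur : Int) + 1) := by
        simp only [pvB_while]
        rw [if_pos ⟨by exact_mod_cast h2, by rw [hsum]; exact hlt⟩]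
      by_cases hc : cur + 1 < L.length
      · -- next element exists
        have hget : PySem.List.pyGet? L ((cur : Int) + 1) = some L[cur + 1] := by
          have : ((cur : Int) + 1) = (((cur + 1 : Nat)) : Int) := by push_cast; ring
          rw [this, PySem.List.pyGet?_natCast, List.getElem?_eq_getElem hc]
        have hAstep : pvA_while L t (f+1) (cur : Int) (pvSeg L j.toNat cur)
              (PySem.List.slice L (some j) (some ((cur : Int) + 1)))
            = pvA_while L t f ((cur : Int) + 1) (pvSeg L j.toNat cur + L[cur + 1])
              (PySem.List.slice L (some j) (some ((cur : Int) + 1)) ++ [L[cur + 1]]) := by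
          simp only [pvA_while, if_pos hlt, hget]
        rw [hBstep, hAstep, pv_seg_succ L j.toNat cur (by omega) hc,
          pv_slice_snoc L j hj cur (by omega) hc]
        have hcast : ((cur : Int) + 1) = (((cur + 1 : Nat)) : Int) := by push_cast; ring
        rw [hcast]
        have := ih (cur + 1) (by omega) hc (by omega)
        rcases this with ⟨k, hk1, hk2, hk3, hk4⟩ | ⟨hb, ha⟩
        · exact Or.inl ⟨k, by omega, hk2, hk3, hk4⟩
        · exact Or.inr ⟨hb, ha⟩
      · -- cur + 1 = length : Python raises IndexError here; A-port yields none, B-port stops at n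
        have hget : PySem.List.pyGet? L ((cur : Int) + 1) = none := by
          have : ((cur : Int) + 1) = (((cur + 1 : Nat)) : Int) := by push_cast; ring
          rw [this, PySem.List.pyGet?_natCast, List.getElem?_eq_none_iff.mpr (by omega)]
        refine Or.inr ⟨?_, by simp only [pvA_while, if_pos hlt, hget]⟩
        rw [hBstep]
        cases f with
        | zero => omega
        | succ f' =>
          simp only [pvB_while]
          rw [if_neg (by omega)]
          omega
    · -- loop stops here
      refine Or.inl ⟨cur, le_refl _, h2, ?_, ?_⟩
      · simp only [pvB_while]
        rw [if_neg (by rw [hsum]; tauto)]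
      · simp only [pvA_while, if_neg hlt]

lemma pv_first_elem (L : List Int) (m : Nat) (hmn : m < L.length) :
    PySem.List.pyGetD L (m : Int) 0 = pvSeg L m m ∧
    [PySem.List.pyGetD L (m : Int) 0] = PySem.List.slice L (some (m : Int)) (some ((m : Int) + 1)) := by
  have hdrop : L.drop m = L[m] :: L.drop (m + 1) := List.drop_eq_getElem_cons hmn
  have htake : (L.drop m).take 1 = [L[m]] := by rw [hdrop]; rfl
  have hget : PySem.List.pyGetD L (m : Int) 0 = L[m] := by
    rw [PySem.List.pyGetD_eq_getElem L 0 (by positivity) (by exact_mod_cast hmn)]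
    simp
  refine ⟨?_, ?_⟩
  · show _ = ((L.drop m).take (m + 1 - m)).sum
    rw [show m + 1 - m = 1 from by omega, htake, hget]; simp
  · rw [PySem.List.slice_toNat L (by positivity) (by positivity),
      show ((m : Int) + 1).toNat = m + 1 from by omega,
      show ((m : Int)).toNat = m from by omega,
      show m + 1 - m = 1 from by omega, hget, htake]

lemma pv_searchJ_eq (L : List Int) (t : Int) (js : List Int)
    (hjs : ∀ j ∈ js, 0 ≤ j ∧ j < (L.length : Int)) :
    pvA_searchJ L t js = pvB_searchJ L (pvB_pref L) L.length t js := by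
  induction js with
  | nil => rfl
  | cons j rest ih =>
    have hrest := fun x hx => hjs x (List.mem_cons_of_mem _ hx)
    obtain ⟨hj, hjn⟩ := hjs j (List.mem_cons_self ..)
    obtain ⟨m, hm⟩ : ∃ m : Nat, (m : Int) = j := ⟨j.toNat, by omega⟩
    subst hm
    have hmn : m < L.length := by exact_mod_cast hjn
    obtain ⟨hf1, hf2⟩ := pv_first_elem L m hmn
    simp only [pvA_searchJ, pvB_searchJ]
    rw [hf2, hf1]
    have hmain := pv_while_eq L t (m : Int) (by positivity) (L.length + 1) m
      (by simp) hmn (by omega)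
    simp only [Int.toNat_natCast] at hmain
    rcases hmain with ⟨k, hk1, hk2, hk3, hk4⟩ | ⟨hb, ha⟩
    · rw [hk3]
      simp only [hk4]
      have hdiff := pv_sum_diff L (m : Int) (by positivity) k (by simp; omega) hk2
      simp only [Int.toNat_natCast] at hdiff
      by_cases heq : t = pvSeg L m k
      · rw [if_pos heq, if_pos ⟨by exact_mod_cast hk2, by rw [hdiff]; exact heq.symm⟩]
      · rw [if_neg heq, if_neg (fun h => heq (by rw [hdiff] at h; exact h.2.symm)), ih hrest]
    · rw [hb]
      simp only [ha]
      rw [if_neg (by rintro ⟨h, -⟩; omega), ih hrest]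

lemma pv_mem_dropTake (L : List Int) (a b : Nat) (hb : b ≤ L.length) (x : Int) :
    x ∈ (L.drop a).take (b - a) ↔ ∃ m : Nat, a ≤ m ∧ m < b ∧ L.getD m 0 = x := by
  constructor
  · intro hx
    obtain ⟨idx, hidx, hxe⟩ := List.mem_iff_getElem.mp hx
    have hlen : idx < b - a := by
      have := hidx; simp [List.length_take, List.length_drop] at this; omega
    have hlen2 : a + idx < L.length := by
      have := hidx; simp [List.length_take, List.length_drop] at this; omega
    refine ⟨a + idx, by omega, by omega, ?_⟩
    rw [List.getD_eq_getElem _ _ hlen2, ← hxe]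
    rw [List.getElem_take, List.getElem_drop]
  · rintro ⟨m, h1, h2, h3⟩
    have hm : m < L.length := by omega
    rw [List.getD_eq_getElem _ _ hm] at h3
    apply List.mem_iff_getElem.mpr
    refine ⟨m - a, by simp [List.length_take, List.length_drop]; omega, ?_⟩
    rw [List.getElem_take, List.getElem_drop, ← h3]
    congr 1; omega

lemma pv_mem_slice (L : List Int) (a b : Int) (ha : 0 ≤ a) (hab : a ≤ b)
    (hb : b ≤ (L.length : Int)) (x : Int) :
    x ∈ PySem.List.slice L (some a) (some b) ↔
      ∃ m : Nat, a ≤ (m : Int) ∧ (m : Int) < b ∧ L.getD m 0 = x := by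
  rw [PySem.List.slice_toNat L ha (by omega),
    pv_mem_dropTake L a.toNat b.toNat (by omega) x]
  constructor
  · rintro ⟨m, h1, h2, h3⟩; exact ⟨m, by omega, by omega, h3⟩
  · rintro ⟨m, h1, h2, h3⟩; exact ⟨m, by omega, by omega, h3⟩

lemma pv_check_eq (L : List Int) (p i : Int) (hp : 0 ≤ p) (hi : p ≤ i) (hin : i < (L.length : Int)) :
    (PySem.List.pyGetD L i 0 ∈ pvA_sumlist L p i) ↔
      ((PySem.Set.ofList (PySem.List.slice L (some (i - p)) (some i))).any
        (fun x => decide ((PySem.List.pyGetD L i 0 - x) ∈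
          PySem.Set.ofList (PySem.List.slice L (some (i - p)) (some i)))) = true) := by
  have hip : 0 ≤ i - p := by omega
  have hin' : i ≤ (L.length : Int) := by omega
  -- A's list of sums is the flatMap of the two index ranges
  have hA : pvA_sumlist L p i
      = (PySem.List.pyRange (i - p) i 1).flatMap (fun j =>
          (PySem.List.pyRange j i 1).map (fun k =>
            PySem.List.pyGetD L j 0 + PySem.List.pyGetD L k 0)) := by
    unfold pvA_sumlist
    trans ((PySem.List.pyRange (i - p) i 1).foldl (fun acc j =>
      acc ++ (PySem.List.pyRange j i 1).map (fun k =>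
        PySem.List.pyGetD L j 0 + PySem.List.pyGetD L k 0)) [])
    · exact PySem.List.foldl_congr_mem _ _ _ _
        (fun acc j _ => PySem.List.foldl_append_singleton_eq_map _ _ _)
    · rw [PySem.List.foldl_append_eq_flatMap]
      simp
  rw [hA]
  simp only [List.mem_flatMap, List.mem_map, PySem.List.mem_pyRange_one, List.any_eq_true,
    decide_eq_true_eq, PySem.Set.mem_ofList]
  simp only [pv_mem_slice L (i - p) i hip (by omega) hin']
  have hgd : ∀ m : Nat, m < L.length → PySem.List.pyGetD L (m : Int) 0 = L.getD m 0 := by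
    intro m hm
    rw [PySem.List.pyGetD_eq_getElem L 0 (by positivity) (by exact_mod_cast hm),
      List.getD_eq_getElem _ _ hm]
    simp
  constructor
  · rintro ⟨j, ⟨hj1, hj2⟩, y, ⟨⟨hk1, hk2⟩, hy⟩⟩
    have hjn : j.toNat < L.length := by omega
    have hyn : y.toNat < L.length := by omega
    have hj' : ((j.toNat : Nat) : Int) = j := by omega
    have hy' : ((y.toNat : Nat) : Int) = y := by omega
    refine ⟨L.getD j.toNat 0, ⟨j.toNat, by omega, by omega, rfl⟩,
      ⟨y.toNat, by omega, by omega, ?_⟩⟩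
    rw [← hgd y.toNat hyn, hy', ← hy, ← hgd j.toNat hjn, hj']
    ring
  · rintro ⟨x, ⟨m1, hm11, hm12, hm13⟩, m2, hm21, hm22, hm23⟩
    have hn1 : m1 < L.length := by omega
    have hn2 : m2 < L.length := by omega
    by_cases h : m1 ≤ m2
    · refine ⟨(m1 : Int), ⟨hm11, hm12⟩, (m2 : Int), ⟨by exact_mod_cast h, hm22⟩, ?_⟩
      rw [hgd m1 hn1, hgd m2 hn2, hm13, hm23]; ring
    · refine ⟨(m2 : Int), ⟨hm21, hm22⟩, (m1 : Int), ⟨by exact_mod_cast (by omega : m2 ≤ m1), hm12⟩, ?_⟩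
      rw [hgd m2 hn2, hgd m1 hn1, hm13, hm23]; ring

lemma pv_go_eq (L : List Int) (p : Int) (hp : 0 ≤ p) (is : List Int)
    (his : ∀ i ∈ is, p ≤ i ∧ i < (L.length : Int)) :
    pvA_go L p is = pvB_go L (pvB_pref L) L.length p is := by
  induction is with
  | nil => rfl
  | cons i rest ih =>
    obtain ⟨hi1, hi2⟩ := his i (List.mem_cons_self ..)
    have hrest := fun x hx => his x (List.mem_cons_of_mem _ hx)
    simp only [pvA_go, pvB_go]
    have hjs : ∀ j ∈ PySem.List.pyRange 0 i 1, 0 ≤ j ∧ j < (L.length : Int) := by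
      intro j hj
      rw [PySem.List.mem_pyRange_one] at hj
      exact ⟨hj.1, by omega⟩
    by_cases hc : PySem.List.pyGetD L i 0 ∈ pvA_sumlist L p i
    · rw [if_pos hc, if_pos ((pv_check_eq L p i hp hi1 hi2).mp hc), ih hrest]
    · rw [if_neg hc, if_neg (fun h => hc ((pv_check_eq L p i hp hi1 hi2).mpr h))]
      rw [pv_searchJ_eq L _ _ hjs]
      cases pvB_searchJ L (pvB_pref L) L.length (PySem.List.pyGetD L i 0) (PySem.List.pyRange 0 i 1) with
      | some r => rfl
      | none => exact ih hrest

-- ===== VERDICT (by name: the statement is the Claim_ definition above) =====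
theorem find_invalid_spec : Claim_equal_find_invalid := by
  intro L p _ hPre
  unfold Spec_find_invalid find_invalid find_invalid_alt
  rw [pv_range_eq L p hPre.1]
  exact pv_go_eq L p hPre.1 _ (fun i hi => by
    rw [PySem.List.mem_pyRange_one] at hi; exact hi)
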